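-- pv_equiv track=rewrite | github.com/ProkEA/Public | number.py | check_if_str_valid
-- ===== SOURCE A (Python) =====
-- def check_if_str_valid(str_pattern):
--     valid_str_flag = 0
--
--     for i in str_pattern:
--         if i.isdigit() or i == ' ':
--             valid_str_flag = 1
--         else:
--             valid_str_flag = 0
--             break
--     if str_pattern.endswith(' '):
--         valid_str_flag = 0
--     return valid_str_flag
-- ===== SOURCE B (Python) =====
-- def check_if_str_valid(str_pattern):
--     cleaned = ''.join(c for c in str_pattern if c != ' ')
--     return 1 if cleaned.isdigit() and not str_pattern.endswith(' ') else 0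
-- ===== Notes on version B (the rewrite author's own statement) =====
-- stated objective: simpler
-- what changed: Replaces A's per-character flag loop with early break by a filter-out-spaces then single whole-string isdigit test combined with the endswith guard in one expression.
import Mathlib
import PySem

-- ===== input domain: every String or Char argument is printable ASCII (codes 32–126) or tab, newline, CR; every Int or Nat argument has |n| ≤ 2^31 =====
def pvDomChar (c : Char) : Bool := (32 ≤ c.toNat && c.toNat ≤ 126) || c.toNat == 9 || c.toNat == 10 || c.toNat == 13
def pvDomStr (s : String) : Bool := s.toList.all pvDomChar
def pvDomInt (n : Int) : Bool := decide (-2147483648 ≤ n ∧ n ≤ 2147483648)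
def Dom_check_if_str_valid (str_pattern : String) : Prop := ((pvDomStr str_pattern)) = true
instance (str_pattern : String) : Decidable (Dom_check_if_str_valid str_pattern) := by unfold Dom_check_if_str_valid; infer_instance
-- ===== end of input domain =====

-- B replaces A's per-character flag loop (with break) by a filter-then-whole-string isdigit test; objective: simpler.

-- ===== PORT A =====
-- the for-loop with break: flag is the running state, an invalid char stops with 0
def checkLoopA (flag : Int) : List Char → Int
  | [] => flag
  | c :: cs => if PySem.Chars.isdigit c || (c == ' ') then checkLoopA 1 cs else 0

def check_if_str_valid (str_pattern : String) : Int :=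
  let valid_str_flag := checkLoopA 0 str_pattern.toList
  let valid_str_flag := if PySem.Str.endswith str_pattern " " then 0 else valid_str_flag
  valid_str_flag

-- ===== PORT B =====
def check_if_str_valid_alt (str_pattern : String) : Int :=
  let cleaned := str_pattern.toList.filter (fun c => c != ' ')
  if PySem.Chars.strIsdigit cleaned && !(PySem.Str.endswith str_pattern " ") then 1 else 0

-- ===== PRECONDITION & SPEC =====
def Spec_check_if_str_valid (str_pattern : String) (out : Int) : Prop := out = check_if_str_valid_alt str_pattern
instance (str_pattern : String) (out : Int) : Decidable (Spec_check_if_str_valid str_pattern out) := by unfold Spec_check_if_str_valid; infer_instance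

-- ===== CLAIM (what is proved, stated in full; the proofs are below) =====
def Claim_equal_check_if_str_valid : Prop := ∀ (str_pattern : String), Dom_check_if_str_valid str_pattern → Spec_check_if_str_valid str_pattern (check_if_str_valid str_pattern)

-- ===== LEMMAS AND PROOFS =====

-- the loop returns 1 exactly on a nonempty all-valid string
theorem checkLoopA_eq (cs : List Char) (f : Int) :
    checkLoopA f cs = if cs = [] then f else (if cs.all (fun c => PySem.Chars.isdigit c || (c == ' ')) then 1 else 0) := by
  induction cs generalizing f with
  | nil => rfl
  | cons c cs ih =>
    simp only [checkLoopA, ih, List.all_cons]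
    by_cases h : (PySem.Chars.isdigit c || (c == ' ')) = true
    · simp [h]
      rcases cs with _ | _ <;> simp
    · simp [h]


theorem getLast_ne_of_not_spaceSuffix (t : List Char) (a : Char)
    (h : ¬ ([' '] <:+ (t ++ [a]))) : a ≠ ' ' := by
  intro ha
  exact h ⟨t, by rw [ha]⟩

theorem main_eq (s : String) : check_if_str_valid s = check_if_str_valid_alt s := by
  simp only [check_if_str_valid, check_if_str_valid_alt, checkLoopA_eq,
    PySem.Str.endswith_eq, show (" " : String).toList = [' '] from rfl]
  by_cases hE : PySem.Chars.endswith s.toList [' '] = true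
  · simp [hE]
  · have hE' : PySem.Chars.endswith s.toList [' '] = false := Bool.of_not_eq_true hE
    have hsuf : ¬ ([' '] <:+ s.toList) := fun h => hE ((PySem.Chars.endswith_iff _ _).mpr h)
    simp only [hE', Bool.not_false, Bool.and_true, Bool.false_eq_true, ite_false]
    rcases List.eq_nil_or_concat s.toList with hnil | ⟨t, a, hta⟩
    · simp [hnil, PySem.Chars.strIsdigit]
    · have hne : s.toList ≠ [] := by simp [hta]
      rw [if_neg hne]
      by_cases hall : s.toList.all (fun c => PySem.Chars.isdigit c || (c == ' ')) = true
      · -- every char is a digit or space, last char is not a space ⇒ cleaned is nonempty all-digit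
        have hA : ∀ c ∈ s.toList, (PySem.Chars.isdigit c || (c == ' ')) = true := by
          simpa [List.all_eq_true] using hall
        have hane : a ≠ ' ' := getLast_ne_of_not_spaceSuffix t a (by rw [← List.concat_eq_append, ← hta]; exact hsuf)
        have hamem : a ∈ s.toList := by rw [hta]; simp
        have hadig : PySem.Chars.isdigit a = true := by
          rcases Bool.or_eq_true_iff.mp (hA a hamem) with h | h
          · exact h
          · exact absurd (by simpa using h) hane
        have hmemf : a ∈ s.toList.filter (fun c => c != ' ') := by
          simp [List.mem_filter, hamem, hane]
        have hdig : PySem.Chars.strIsdigit (s.toList.filter (fun c => c != ' ')) = true := by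
          simp only [PySem.Chars.strIsdigit, Bool.and_eq_true, Bool.not_eq_true',
            List.isEmpty_eq_false_iff, List.all_eq_true]
          refine ⟨List.ne_nil_of_mem hmemf, ?_⟩
          intro c hc
          rcases List.mem_filter.mp hc with ⟨hcm, hcne⟩
          rcases Bool.or_eq_true_iff.mp (hA c hcm) with h | h
          · exact h
          · exact absurd h (by simpa using hcne)
        simp [hall, hdig]
      · -- some char is neither digit nor space ⇒ it survives the filter and is not a digit
        have hallf : s.toList.all (fun c => PySem.Chars.isdigit c || (c == ' ')) = false :=
          Bool.of_not_eq_true hall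
        rw [List.all_eq_false] at hallf
        rcases hallf with ⟨c, hcm, hcf⟩
        have hcf' : (PySem.Chars.isdigit c || (c == ' ')) = false := Bool.of_not_eq_true hcf
        have hcnd : PySem.Chars.isdigit c = false := (Bool.or_eq_false_iff.mp hcf').1
        have hcns : c ≠ ' ' := by
          have := (Bool.or_eq_false_iff.mp hcf').2
          simpa using this
        have hmemf : c ∈ s.toList.filter (fun cc => cc != ' ') := by
          simp [List.mem_filter, hcm, hcns]
        have hdig : PySem.Chars.strIsdigit (s.toList.filter (fun cc => cc != ' ')) = false := by
          simp only [PySem.Chars.strIsdigit, Bool.and_eq_false_iff]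
          right
          rw [List.all_eq_false]
          exact ⟨c, hmemf, by simp [hcnd]⟩
        have hallf2 := Bool.of_not_eq_true hall
        simp [hallf2, hdig]

-- ===== VERDICT (by name: the statement is the Claim_ definition above) =====
theorem check_if_str_valid_spec : Claim_equal_check_if_str_valid := by
  intro s _
  unfold Spec_check_if_str_valid
  exact main_eq s
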